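-- pv_equiv track=rewrite | github.com/JACK101816/Projects | Python/hog/hog.py | swap_strategy
-- ===== SOURCE A (Python) =====
-- def free_bacon(opponent_score):
--     """Return the points scored from rolling 0 dice (Free Bacon)."""
--     # BEGIN PROBLEM 2
--     if opponent_score % 10 > opponent_score // 10:
--         return opponent_score % 10 + 1
--     else:
--         return opponent_score // 10 + 1
--
-- def bacon_strategy(score, opponent_score, margin=8, num_rolls=4):
--     """This strategy rolls 0 dice if that gives at least MARGIN points,
--     and rolls NUM_ROLLS otherwise.
--     """
--     # BEGIN PROBLEM 9
--     s = free_bacon(opponent_score)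
--     def is_prime(n):
--         if n < 2:
--             return False
--         k = 2
--         while k < n:
--             if n % k == 0:
--                 return False
--             else:
--                 k = k + 1
--         return True
--
--     def next_prime(n):
--         k = 1
--         while not is_prime(n + k):
--             k = k + 1
--         return n + k
--
--     if is_prime(s):
--         s = next_prime(s)
--
--     if s >= margin:
--         return 0
--     return num_rolls  # Replace this statement
--
-- def swap_strategy(score, opponent_score, margin=8, num_rolls=4):
--     """This strategy rolls 0 dice when it triggers a beneficial swap. It also
--     rolls 0 dice if it gives at least MARGIN points. Otherwise, it rolls
--     NUM_ROLLS.
--     """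
--     # BEGIN PROBLEM 10
--     s = free_bacon(opponent_score)
--     def is_prime(n):
--         if n < 2:
--             return False
--         k = 2
--         while k < n:
--             if n % k == 0:
--                 return False
--             else:
--                 k = k + 1
--         return True
--
--     def next_prime(n):
--         k = 1
--         while not is_prime(n + k):
--             k = k + 1
--         return n + k
--
--     if is_prime(s):
--         s = next_prime(s)
--     if (s + score) * 2 == opponent_score:
--         return 0
--     elif bacon_strategy(score, opponent_score, margin=8, num_rolls=4) == 0:
--         return 0
--
--     return num_rolls  # Replace this statement
-- ===== SOURCE B (Python) =====
-- def swap_strategy(score, opponent_score, margin=8, num_rolls=4):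
--     """Roll 0 on a beneficial swap or when Free Bacon (prime-adjusted)
--     yields at least 8 points; otherwise roll num_rolls."""
--     d, m = divmod(opponent_score, 10)
--     s = max(d, m) + 1
--
--     def is_prime(n):
--         if n < 2:
--             return False
--         k = 2
--         while k * k <= n:
--             if n % k == 0:
--                 return False
--             k = k + 1
--         return True
--
--     if is_prime(s):
--         k = s + 1
--         while not is_prime(k):
--             k = k + 1
--         s = k
--
--     if (s + score) * 2 == opponent_score or s >= 8:
--         return 0
--     return num_rolls
-- ===== Notes on version B (the rewrite author's own statement) =====
-- stated objective: faster
-- what changed: Primality is tested by trial division only up to sqrt(n) instead of all k < n, free bacon is computed as max(divmod(opponent_score,10))+1, and the delegated bacon_strategy(margin=8) call is inlined as a single 's >= 8' disjunct.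
import Mathlib
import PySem

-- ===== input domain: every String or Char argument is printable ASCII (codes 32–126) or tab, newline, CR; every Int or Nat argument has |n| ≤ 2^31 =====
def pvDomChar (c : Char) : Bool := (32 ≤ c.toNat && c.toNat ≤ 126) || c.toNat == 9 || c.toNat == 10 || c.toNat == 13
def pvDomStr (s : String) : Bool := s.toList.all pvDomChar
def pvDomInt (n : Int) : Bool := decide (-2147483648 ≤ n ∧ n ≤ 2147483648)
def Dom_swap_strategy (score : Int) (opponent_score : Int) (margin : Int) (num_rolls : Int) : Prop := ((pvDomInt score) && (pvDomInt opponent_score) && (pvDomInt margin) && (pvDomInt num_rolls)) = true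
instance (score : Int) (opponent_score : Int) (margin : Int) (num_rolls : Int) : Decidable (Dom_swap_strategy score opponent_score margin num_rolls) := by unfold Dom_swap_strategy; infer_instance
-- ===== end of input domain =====

-- B replaces A's O(n) trial division (k up to n) by the idiomatic O(√n) test (k*k ≤ n),
-- computes free bacon as max(divmod)+1 and folds A's delegated bacon_strategy(margin=8)
-- call into a single 's >= 8' disjunct; same return value everywhere.
-- The unbounded `while not is_prime(...)` searches are ported with a fuel of n+2 steps,
-- which both ports share; the Python loops stop within that bound on every call the
-- strategies make (they start from a prime, and a further prime exists within the fuel).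

-- ===== PORT A =====
def pvFreeBaconA (opponent_score : Int) : Int :=
  if PySem.Int.mod opponent_score 10 > PySem.Int.floordiv opponent_score 10 then
    PySem.Int.mod opponent_score 10 + 1
  else
    PySem.Int.floordiv opponent_score 10 + 1

-- A's inner `while k < n` divisor scan
def pvIsPrimeALoop (n k : Int) : Bool :=
  if h : k < n then
    if PySem.Int.mod n k = 0 then false else pvIsPrimeALoop n (k + 1)
  else true
termination_by (n - k).toNat
decreasing_by omega

def pvIsPrimeA (n : Int) : Bool :=
  if n < 2 then false else pvIsPrimeALoop n 2

-- A's `while not is_prime(n + k): k += 1`, offset form; fuel only to make the port total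
def pvNextPrimeALoop (n k : Int) : Nat → Int
  | 0 => n + k
  | fuel + 1 => if pvIsPrimeA (n + k) then n + k else pvNextPrimeALoop n (k + 1) fuel

def pvNextPrimeA (n : Int) : Int := pvNextPrimeALoop n 1 (n.toNat + 2)

def bacon_strategy (score : Int) (opponent_score : Int) (margin : Int) (num_rolls : Int) : Int :=
  let s := pvFreeBaconA opponent_score
  let s := if pvIsPrimeA s then pvNextPrimeA s else s
  if s ≥ margin then 0 else num_rolls

def swap_strategy (score : Int) (opponent_score : Int) (margin : Int) (num_rolls : Int) : Int :=
  let s := pvFreeBaconA opponent_score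
  let s := if pvIsPrimeA s then pvNextPrimeA s else s
  if (s + score) * 2 = opponent_score then 0
  else if bacon_strategy score opponent_score 8 4 = 0 then 0
  else num_rolls

-- ===== PORT B =====
-- B's `while k * k <= n` divisor scan
def pvIsPrimeBLoop (n k : Int) : Bool :=
  if h : k * k ≤ n then
    if PySem.Int.mod n k = 0 then false else pvIsPrimeBLoop n (k + 1)
  else true
termination_by (n + 1 - k).toNat
decreasing_by
  have hk : k ≤ n := by nlinarith [sq_nonneg k]
  omega

def pvIsPrimeB (n : Int) : Bool :=
  if n < 2 then false else pvIsPrimeBLoop n 2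

-- B's `k = s + 1; while not is_prime(k): k += 1`, absolute form; same fuel as A's port
def pvNextPrimeBLoop (k : Int) : Nat → Int
  | 0 => k
  | fuel + 1 => if pvIsPrimeB k then k else pvNextPrimeBLoop (k + 1) fuel

def swap_strategy_alt (score : Int) (opponent_score : Int) (margin : Int) (num_rolls : Int) : Int :=
  let d := PySem.Int.floordiv opponent_score 10
  let m := PySem.Int.mod opponent_score 10
  let s := max d m + 1
  let s := if pvIsPrimeB s then pvNextPrimeBLoop (s + 1) (s.toNat + 2) else s
  if (s + score) * 2 = opponent_score || s ≥ 8 then 0 else num_rolls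

-- ===== PRECONDITION & SPEC =====
def Spec_swap_strategy (score : Int) (opponent_score : Int) (margin : Int) (num_rolls : Int) (out : Int) : Prop := out = swap_strategy_alt score opponent_score margin num_rolls
instance (score : Int) (opponent_score : Int) (margin : Int) (num_rolls : Int) (out : Int) : Decidable (Spec_swap_strategy score opponent_score margin num_rolls out) := by unfold Spec_swap_strategy; infer_instance

-- ===== CLAIM (what is proved, stated in full; the proofs are below) =====
def Claim_equal_swap_strategy : Prop := ∀ (score : Int) (opponent_score : Int) (margin : Int) (num_rolls : Int), Dom_swap_strategy score opponent_score margin num_rolls → Spec_swap_strategy score opponent_score margin num_rolls (swap_strategy score opponent_score margin num_rolls)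

-- ===== LEMMAS AND PROOFS =====

lemma pvIsPrimeALoop_iff (n k : Int) :
    pvIsPrimeALoop n k = true ↔ ∀ j : Int, k ≤ j → j < n → ¬ j ∣ n := by
  rw [pvIsPrimeALoop]
  by_cases h : k < n
  · simp only [dif_pos h]
    by_cases hd : PySem.Int.mod n k = 0
    · have hdvd : k ∣ n := (PySem.Int.mod_eq_zero_iff_dvd n k).mp hd
      rw [if_pos hd]
      simp only [Bool.false_eq_true, false_iff, not_forall]
      exact ⟨k, le_rfl, h, by simp [hdvd]⟩
    · have hnd : ¬ k ∣ n := fun hh => hd ((PySem.Int.mod_eq_zero_iff_dvd n k).mpr hh)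
      rw [if_neg hd, pvIsPrimeALoop_iff n (k + 1)]
      constructor
      · intro hall j hkj hjn
        rcases eq_or_lt_of_le hkj with rfl | hlt
        · exact hnd
        · exact hall j (by omega) hjn
      · intro hall j hkj hjn; exact hall j (by omega) hjn
  · simp only [dif_neg h, true_iff]
    intro j hkj hjn; omega
termination_by (n - k).toNat
decreasing_by omega

lemma pvIsPrimeBLoop_iff (n k : Int) (h2 : 2 ≤ k) :
    pvIsPrimeBLoop n k = true ↔ ∀ j : Int, k ≤ j → j * j ≤ n → ¬ j ∣ n := by
  rw [pvIsPrimeBLoop]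
  by_cases h : k * k ≤ n
  · simp only [dif_pos h]
    by_cases hd : PySem.Int.mod n k = 0
    · have hdvd : k ∣ n := (PySem.Int.mod_eq_zero_iff_dvd n k).mp hd
      rw [if_pos hd]
      simp only [Bool.false_eq_true, false_iff, not_forall]
      exact ⟨k, le_rfl, h, by simp [hdvd]⟩
    · have hnd : ¬ k ∣ n := fun hh => hd ((PySem.Int.mod_eq_zero_iff_dvd n k).mpr hh)
      rw [if_neg hd, pvIsPrimeBLoop_iff n (k + 1) (by omega)]
      constructor
      · intro hall j hkj hjn
        rcases eq_or_lt_of_le hkj with rfl | hlt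
        · exact hnd
        · exact hall j (by omega) hjn
      · intro hall j hkj hjn; exact hall j (by omega) hjn
  · simp only [dif_neg h, true_iff]
    intro j hkj hjn
    exact absurd (le_trans (by nlinarith : k * k ≤ j * j) hjn) h
termination_by (n + 1 - k).toNat
decreasing_by
  have hk : k ≤ n := by nlinarith
  omega

-- trial division up to n-1 and trial division up to √n find the same composites
lemma pvDivisor_bridge (n : Int) (hn : 2 ≤ n) :
    (∀ j : Int, 2 ≤ j → j < n → ¬ j ∣ n) ↔ (∀ j : Int, 2 ≤ j → j * j ≤ n → ¬ j ∣ n) := by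
  constructor
  · intro hall j h2 hsq
    exact hall j h2 (by nlinarith)
  · intro hall j h2 hjn hdvd
    obtain ⟨m, hm⟩ := hdvd
    have hj0 : 0 < j := by omega
    have hm2 : 2 ≤ m := by nlinarith
    by_cases hsq : j * j ≤ n
    · exact hall j h2 hsq ⟨m, hm⟩
    · have hmj : m < j := by nlinarith
      exact hall m hm2 (by nlinarith) ⟨j, by linarith [hm, mul_comm j m]⟩

lemma pvIsPrime_eq (n : Int) : pvIsPrimeA n = pvIsPrimeB n := by
  unfold pvIsPrimeA pvIsPrimeB
  split_ifs with h
  · rfl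
  · have hA := pvIsPrimeALoop_iff n 2
    have hB := pvIsPrimeBLoop_iff n 2 (le_refl 2)
    have hb := pvDivisor_bridge n (by omega)
    cases hA2 : pvIsPrimeALoop n 2 <;> cases hB2 : pvIsPrimeBLoop n 2 <;> try rfl
    · exact absurd (hA.mpr (hb.mpr (hB.mp hB2))) (by simp [hA2])
    · exact absurd (hB.mpr (hb.mp (hA.mp hA2))) (by simp [hB2])

lemma pvNextPrime_eq (fuel : Nat) : ∀ n k : Int,
    pvNextPrimeALoop n k fuel = pvNextPrimeBLoop (n + k) fuel := by
  induction fuel with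
  | zero => intro n k; rfl
  | succ fuel ih =>
    intro n k
    simp only [pvNextPrimeALoop, pvNextPrimeBLoop, pvIsPrime_eq]
    split_ifs with h
    · rfl
    · rw [ih n (k + 1)]; ring_nf

lemma pvFreeBacon_max (opp : Int) :
    pvFreeBaconA opp = max (PySem.Int.floordiv opp 10) (PySem.Int.mod opp 10) + 1 := by
  unfold pvFreeBaconA
  split_ifs with h <;> omega

-- ===== VERDICT (by name: the statement is the Claim_ definition above) =====
theorem swap_strategy_spec : Claim_equal_swap_strategy := by
  intro score opp margin num_rolls _hDom
  unfold Spec_swap_strategy swap_strategy swap_strategy_alt bacon_strategy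
  simp only [← pvFreeBacon_max, pvIsPrime_eq, pvNextPrimeA]
  have hnp : ∀ n : Int, pvNextPrimeALoop n 1 (n.toNat + 2) = pvNextPrimeBLoop (n + 1) (n.toNat + 2) :=
    fun n => pvNextPrime_eq (n.toNat + 2) n 1
  rw [hnp]
  set s := if pvIsPrimeB (pvFreeBaconA opp) then
      pvNextPrimeBLoop (pvFreeBaconA opp + 1) ((pvFreeBaconA opp).toNat + 2)
    else pvFreeBaconA opp with hs
  by_cases h1 : (s + score) * 2 = opp <;> by_cases h2 : s ≥ 8 <;> simp [h1, h2]
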